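-- pv_equiv track=rewrite | github.com/SCismycat/AlgoWithLeetCode | algos/FindMaxElimiteZuma.py | findMaxZuma
-- ===== SOURCE A (Python) =====
-- from itertools import combinations
--
-- def findMaxZuma(lists):
--     if lists is None:
--         return
--     lists_reset = list(set(lists))
--     combine_list = combinations(lists_reset,2)
--     maxNum = 0
--     for tup in combine_list:
--         if tup[0]==tup[1]:
--             continue
--         list1 = [0 for x in range(len(lists))]
--         for i in range(len(lists)):
--             if lists[i] ==tup[0]:
--                 list1[i] = 0
--             elif lists[i] == tup[1]:
--                 list1[i] = 0
--             else:
--                 list1[i] = -1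
--             # p判断首尾
--
--         res= 1
--         for i in range(len(list1)-1):
--             if list1[i] ==list1[i+1]==0:
--                     res+=1
--             else:
--                 continue
--         if res>maxNum:
--             maxNum = res
--     return maxNum
-- ===== SOURCE B (Python) =====
-- def findMaxZuma(lists):
--     if lists is None:
--         return
--     # one pass: count every adjacent pair of values under a normalized (min, max) key
--     adj = {}
--     for x, y in zip(lists, lists[1:]):
--         key = (x, y) if x <= y else (y, x)
--         adj[key] = adj.get(key, 0) + 1
--     values = list(set(lists))
--     maxNum = 0
--     for idx, a in enumerate(values):
--         for b in values[idx + 1:]: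
--             key = (a, b) if a <= b else (b, a)
--             res = 1 + adj.get((a, a), 0) + adj.get((b, b), 0) + adj.get(key, 0)
--             if res > maxNum:
--                 maxNum = res
--     return maxNum
-- ===== Notes on version B (the rewrite author's own statement) =====
-- stated objective: faster
-- what changed: Instead of rebuilding and rescanning an O(n) mask list for every candidate value pair, B counts all adjacent value pairs (normalized to (min,max) keys) in one pass into a dictionary and scores each candidate pair with three O(1) lookups.
import Mathlib
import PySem

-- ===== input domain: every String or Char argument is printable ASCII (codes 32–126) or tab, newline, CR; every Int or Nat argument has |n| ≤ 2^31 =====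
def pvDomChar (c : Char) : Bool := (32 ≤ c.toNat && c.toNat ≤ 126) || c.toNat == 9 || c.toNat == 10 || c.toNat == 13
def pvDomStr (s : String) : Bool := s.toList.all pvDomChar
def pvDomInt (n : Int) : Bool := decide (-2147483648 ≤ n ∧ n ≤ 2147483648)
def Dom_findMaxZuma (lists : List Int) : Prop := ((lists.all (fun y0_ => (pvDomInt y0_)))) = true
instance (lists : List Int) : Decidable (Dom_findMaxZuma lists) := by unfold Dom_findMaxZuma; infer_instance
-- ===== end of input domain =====

-- B replaces A's per-candidate-pair O(n) mask-and-scan by one pass counting adjacent value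
-- pairs into a dictionary, scoring each candidate pair with three O(1) lookups (objective: faster).

-- ===== PORT A =====
-- itertools.combinations(xs, 2), ported by hand: all (xs[i], xs[j]) with i < j, in order (exact)
def pvCombos2 : List Int → List (Int × Int)
  | [] => []
  | x :: rest => (rest.map (fun y => (x, y))) ++ pvCombos2 rest

-- the element-wise mask A builds into list1
def pvMask (a b v : Int) : Int := if v = a then 0 else if v = b then 0 else -1

-- A's scan 'for i in range(len(list1)-1): if list1[i]==list1[i+1]==0: res+=1'
def pvAdjZeros : List Int → Int
  | x :: y :: t => (if x = 0 ∧ y = 0 then 1 else 0) + pvAdjZeros (y :: t)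
  | _ => 0

def findMaxZuma (lists : List Int) : Int :=
  let listsReset := PySem.Set.ofList lists
  (pvCombos2 listsReset).foldl (fun maxNum tup =>
    if tup.1 = tup.2 then maxNum
    else
      let list1 := lists.map (pvMask tup.1 tup.2)
      let res := 1 + pvAdjZeros list1
      if res > maxNum then res else maxNum) 0

-- ===== PORT B =====
-- the normalized key '(x, y) if x <= y else (y, x)'
def pvKey (x y : Int) : Int × Int := if x ≤ y then (x, y) else (y, x)

-- B's inner loop 'for b in values[idx+1:]'
def pvInner (adj : PySem.Dict (Int × Int) Int) (a : Int) : List Int → Int → Int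
  | [], m => m
  | b :: rest, m =>
    let res := 1 + adj.getD (a, a) 0 + adj.getD (b, b) 0 + adj.getD (pvKey a b) 0
    pvInner adj a rest (if res > m then res else m)

-- B's outer loop 'for idx, a in enumerate(values)'
def pvOuter (adj : PySem.Dict (Int × Int) Int) : List Int → Int → Int
  | [], m => m
  | a :: rest, m => pvOuter adj rest (pvInner adj a rest m)

def findMaxZuma_alt (lists : List Int) : Int :=
  -- zip(lists, lists[1:]) = lists.zip (lists.drop 1) (exact: slice from nonnegative 1)
  let adj := (lists.zip (lists.drop 1)).foldl
      (fun d p => d.modify (pvKey p.1 p.2) 0 (· + 1)) PySem.Dict.empty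
  let values := PySem.Set.ofList lists
  pvOuter adj values 0

-- ===== PRECONDITION & SPEC =====
def Spec_findMaxZuma (lists : List Int) (out : Int) : Prop := out = findMaxZuma_alt lists
instance (lists : List Int) (out : Int) : Decidable (Spec_findMaxZuma lists out) := by unfold Spec_findMaxZuma; infer_instance

-- ===== CLAIM (what is proved, stated in full; the proofs are below) =====
def Claim_equal_findMaxZuma : Prop := ∀ (lists : List Int), Dom_findMaxZuma lists → Spec_findMaxZuma lists (findMaxZuma lists)

-- ===== LEMMAS AND PROOFS =====

-- generic: folds with functions agreeing on list members agree
theorem pv_foldl_congr {α β : Type} (l : List β) (f g : α → β → α) (init : α)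
    (h : ∀ x ∈ l, ∀ acc, f acc x = g acc x) : l.foldl f init = l.foldl g init := by
  induction l generalizing init with
  | nil => rfl
  | cons x t ih =>
    simp only [List.foldl_cons]
    rw [h x (List.mem_cons_self) init]
    exact ih (g init x) (fun y hy acc => h y (List.mem_cons_of_mem _ hy) acc)

-- pairs produced by combos2 of a Nodup list have distinct components
theorem pv_combos2_ne {l : List Int} (hl : l.Nodup) {p : Int × Int}
    (hp : p ∈ pvCombos2 l) : p.1 ≠ p.2 := by
  induction l with
  | nil => simp [pvCombos2] at hp
  | cons x rest ih =>
    simp only [pvCombos2, List.mem_append, List.mem_map] at hp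
    rcases hp with ⟨y, hy, rfl⟩ | hp
    · intro h; apply (List.nodup_cons.mp hl).1; simp only at h; rwa [h]
    · exact ih (List.nodup_cons.mp hl).2 hp

-- B's nested loops are the fold of its inner step over combos2
theorem pv_inner_eq (adj : PySem.Dict (Int × Int) Int) (a : Int) (rest : List Int) (m : Int) :
    pvInner adj a rest m =
      (rest.map (fun y => (a, y))).foldl (fun m p =>
        let res := 1 + adj.getD (p.1, p.1) 0 + adj.getD (p.2, p.2) 0 + adj.getD (pvKey p.1 p.2) 0
        if res > m then res else m) m := by
  induction rest generalizing m with
  | nil => rfl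
  | cons b t ih => simp [pvInner, List.foldl_cons, ih]

theorem pv_outer_eq (adj : PySem.Dict (Int × Int) Int) (l : List Int) (m : Int) :
    pvOuter adj l m =
      (pvCombos2 l).foldl (fun m p =>
        let res := 1 + adj.getD (p.1, p.1) 0 + adj.getD (p.2, p.2) 0 + adj.getD (pvKey p.1 p.2) 0
        if res > m then res else m) m := by
  induction l generalizing m with
  | nil => rfl
  | cons a rest ih => simp [pvOuter, pvCombos2, List.foldl_append, ih, pv_inner_eq]

-- the dict B builds is the counter of the normalized adjacent-pair keys
theorem pv_adj_eq_counter (lists : List Int) :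
    (lists.zip (lists.drop 1)).foldl
        (fun d p => d.modify (pvKey p.1 p.2) 0 (· + 1)) PySem.Dict.empty =
      PySem.Dict.counter ((lists.zip (lists.drop 1)).map (fun p => pvKey p.1 p.2)) := by
  rw [PySem.Dict.counter_eq_foldl, List.foldl_map]

-- CORE: A's masked adjacent-zero scan = the three counts of normalized keys (a ≠ b)
theorem pv_score_eq (a b : Int) (hab : a ≠ b) (lists : List Int) :
    pvAdjZeros (lists.map (pvMask a b)) =
      (((lists.zip (lists.drop 1)).map (fun p => pvKey p.1 p.2)).count (a, a) : Int)
      + (((lists.zip (lists.drop 1)).map (fun p => pvKey p.1 p.2)).count (b, b) : Int)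
      + (((lists.zip (lists.drop 1)).map (fun p => pvKey p.1 p.2)).count (pvKey a b) : Int) := by
  induction lists with
  | nil => simp [pvAdjZeros]
  | cons x t ih =>
    cases t with
    | nil => simp [pvAdjZeros]
    | cons y t' =>
      have hzip : (x :: y :: t').zip ((x :: y :: t').drop 1) = (x, y) :: (y :: t').zip ((y :: t').drop 1) := by
        simp [List.zip]
      rw [hzip]
      simp only [List.map_cons, List.count_cons, pvAdjZeros] at ih ⊢
      rw [ih]
      have hind : (if pvMask a b x = 0 ∧ pvMask a b y = 0 then (1 : Int) else 0) =
          (if pvKey x y = (a, a) then (1 : Int) else 0)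
          + (if pvKey x y = (b, b) then (1 : Int) else 0)
          + (if pvKey x y = pvKey a b then (1 : Int) else 0) := by
        have hm : ∀ v : Int, pvMask a b v = 0 ↔ (v = a ∨ v = b) := by
          intro v; unfold pvMask; split_ifs <;> simp_all
        have k1 : ∀ u : Int, pvKey x y = (u, u) ↔ (x = u ∧ y = u) := by
          intro u; unfold pvKey; split_ifs <;> simp [Prod.ext_iff] <;> omega
        have k3 : pvKey x y = pvKey a b ↔ ((x = a ∧ y = b) ∨ (x = b ∧ y = a)) := by
          unfold pvKey; split_ifs <;> simp [Prod.ext_iff] <;> omega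
        simp only [hm, k1, k3]
        split_ifs <;> omega
      simp only [beq_iff_eq]
      push_cast
      rw [hind]
      ring

-- ===== VERDICT (by name: the statement is the Claim_ definition above) =====
theorem findMaxZuma_spec : Claim_equal_findMaxZuma := by
  intro lists _
  unfold Spec_findMaxZuma findMaxZuma findMaxZuma_alt
  rw [pv_outer_eq, pv_adj_eq_counter]
  apply pv_foldl_congr
  intro p hp acc
  have hne := pv_combos2_ne (PySem.Set.nodup_ofList lists) hp
  simp only [if_neg hne, PySem.Dict.getD_counter]
  rw [pv_score_eq p.1 p.2 hne lists]
  ring_nf
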